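-- pv_equiv track=rewrite | github.com/VenciFreeman/personal-rag-dashboard | scripts/bug_ticket_sync_hook.py | _infer_domain_from_files
-- ===== SOURCE A (Python) =====
-- def _infer_domain_from_files(file_paths: list[str]) -> str:
--     lowered = [item.lower() for item in file_paths]
--     if any(path.startswith("nav_dashboard/") for path in lowered):
--         return "nav_dashboard"
--     if any(path.startswith("ai_conversations_summary/") for path in lowered):
--         return "ai_conversations_summary"
--     if any(path.startswith("library_tracker/") for path in lowered):
--         return "library_tracker"
--     if any(path.startswith("core_service/") for path in lowered):
--         return "core_service"
--     return ""
-- ===== SOURCE B (Python) =====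
-- _PREFIXES = [
--     ("nav_dashboard/", "nav_dashboard"),
--     ("ai_conversations_summary/", "ai_conversations_summary"),
--     ("library_tracker/", "library_tracker"),
--     ("core_service/", "core_service"),
-- ]
--
--
-- def _rank(path):
--     for i, (prefix, _) in enumerate(_PREFIXES):
--         if path.startswith(prefix):
--             return i
--     return len(_PREFIXES)
--
--
-- def _infer_domain_from_files(file_paths: list[str]) -> str:
--     best = len(_PREFIXES)
--     for path in file_paths:
--         best = min(best, _rank(path.lower()))
--     return _PREFIXES[best][1] if best < len(_PREFIXES) else ""
-- ===== Notes on version B (the rewrite author's own statement) =====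
-- stated objective: simpler
-- what changed: Replaces four separate any()-scans over a lowered copy of the list by one ordered prefix->domain table and a single pass keeping the minimum priority index reached.
import Mathlib
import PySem

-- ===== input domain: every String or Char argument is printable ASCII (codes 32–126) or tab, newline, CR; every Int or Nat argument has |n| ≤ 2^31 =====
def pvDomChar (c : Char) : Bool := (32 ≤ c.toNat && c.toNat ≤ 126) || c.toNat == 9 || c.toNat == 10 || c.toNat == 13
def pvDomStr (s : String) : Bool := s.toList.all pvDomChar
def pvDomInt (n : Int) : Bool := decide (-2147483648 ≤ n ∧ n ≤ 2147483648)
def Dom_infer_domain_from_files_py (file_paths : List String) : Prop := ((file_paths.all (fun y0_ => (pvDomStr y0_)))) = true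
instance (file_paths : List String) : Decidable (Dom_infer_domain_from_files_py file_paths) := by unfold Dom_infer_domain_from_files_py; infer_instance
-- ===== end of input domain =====

-- B replaces A's four separate any()-scans by an ordered prefix table and one
-- minimum-priority pass over the list (objective: simpler).


-- ===== PORT A =====
def infer_domain_from_files_py (file_paths : List String) : String :=
  let lowered := file_paths.map PySem.Str.lower
  if lowered.any (fun path => PySem.Str.startswith path "nav_dashboard/") then "nav_dashboard"
  else if lowered.any (fun path => PySem.Str.startswith path "ai_conversations_summary/") then "ai_conversations_summary"
  else if lowered.any (fun path => PySem.Str.startswith path "library_tracker/") then "library_tracker"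
  else if lowered.any (fun path => PySem.Str.startswith path "core_service/") then "core_service"
  else ""

-- ===== PORT B =====
def pvPrefixes : List (String × String) :=
  [("nav_dashboard/", "nav_dashboard"),
   ("ai_conversations_summary/", "ai_conversations_summary"),
   ("library_tracker/", "library_tracker"),
   ("core_service/", "core_service")]

def pvRankAux : List (String × String) → String → Nat → Nat
  | [], _, i => i
  | (prefix_, _) :: rest, path, i =>
    if PySem.Str.startswith path prefix_ then i else pvRankAux rest path (i + 1)

def pvRank (path : String) : Nat := pvRankAux pvPrefixes path 0

def infer_domain_from_files_py_alt (file_paths : List String) : String :=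
  let best := file_paths.foldl (fun b path => min b (pvRank (PySem.Str.lower path))) pvPrefixes.length
  if best < pvPrefixes.length then (pvPrefixes.getD best ("", "")).2 else ""

-- ===== PRECONDITION & SPEC =====
def Spec_infer_domain_from_files_py (file_paths : List String) (out : String) : Prop := out = infer_domain_from_files_py_alt file_paths
instance (file_paths : List String) (out : String) : Decidable (Spec_infer_domain_from_files_py file_paths out) := by unfold Spec_infer_domain_from_files_py; infer_instance

-- ===== CLAIM (what is proved, stated in full; the proofs are below) =====
def Claim_equal_infer_domain_from_files_py : Prop := ∀ (file_paths : List String), Dom_infer_domain_from_files_py file_paths → Spec_infer_domain_from_files_py file_paths (infer_domain_from_files_py file_paths)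

-- ===== LEMMAS AND PROOFS =====

-- B's per-path rank, written out over the four fixed prefixes.
theorem pvRank_eq (p : String) :
    pvRank p =
      (if PySem.Str.startswith p "nav_dashboard/" then 0
       else if PySem.Str.startswith p "ai_conversations_summary/" then 1
       else if PySem.Str.startswith p "library_tracker/" then 2
       else if PySem.Str.startswith p "core_service/" then 3
       else 4) := by
  simp only [pvRank, pvPrefixes, pvRankAux]

theorem pvRank_le_four (p : String) : pvRank p ≤ 4 := by
  rw [pvRank_eq]; split_ifs <;> omega

-- Pull the accumulator out of B's fold.
theorem foldl_min_acc (fp : List String) (b : Nat) (hb : b ≤ 4) :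
    fp.foldl (fun b path => min b (pvRank (PySem.Str.lower path))) b
      = min b (fp.foldl (fun b path => min b (pvRank (PySem.Str.lower path))) 4) := by
  induction fp generalizing b with
  | nil => simp [Nat.min_eq_left hb]
  | cons p fp ih =>
    have h1 : min b (pvRank (PySem.Str.lower p)) ≤ 4 := by omega
    have h2 : min 4 (pvRank (PySem.Str.lower p)) ≤ 4 := by omega
    simp only [List.foldl_cons, ih _ h1, ih _ h2]
    omega

-- The boolean core: one cons step of B's minimum-of-ranks equals A's or-accumulation.
theorem min_rank_step (s0 s1 s2 s3 a0 a1 a2 a3 : Bool) :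
    min (if s0 then 0 else if s1 then 1 else if s2 then 2 else if s3 then 3 else 4)
        (if a0 then 0 else if a1 then 1 else if a2 then 2 else if a3 then 3 else (4 : Nat))
      = (if (s0 || a0) then 0 else if (s1 || a1) then 1 else if (s2 || a2) then 2
         else if (s3 || a3) then 3 else 4) := by
  cases s0 <;> cases s1 <;> cases s2 <;> cases s3 <;>
    cases a0 <;> cases a1 <;> cases a2 <;> cases a3 <;> rfl

-- B's fold expressed through A's four any-scans.
theorem best_char (fp : List String) :
    fp.foldl (fun b path => min b (pvRank (PySem.Str.lower path))) 4
      = (if fp.any (fun p => PySem.Str.startswith (PySem.Str.lower p) "nav_dashboard/") then 0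
         else if fp.any (fun p => PySem.Str.startswith (PySem.Str.lower p) "ai_conversations_summary/") then 1
         else if fp.any (fun p => PySem.Str.startswith (PySem.Str.lower p) "library_tracker/") then 2
         else if fp.any (fun p => PySem.Str.startswith (PySem.Str.lower p) "core_service/") then 3
         else 4) := by
  induction fp with
  | nil => simp
  | cons p fp ih =>
    rw [List.foldl_cons,
      foldl_min_acc fp _ (by have := pvRank_le_four (PySem.Str.lower p); omega), ih,
      Nat.min_eq_right (pvRank_le_four _), pvRank_eq]
    simp only [List.any_cons]
    exact min_rank_step _ _ _ _ _ _ _ _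

theorem infer_domain_from_files_py_spec : Claim_equal_infer_domain_from_files_py := by
  intro fp _
  unfold Spec_infer_domain_from_files_py infer_domain_from_files_py infer_domain_from_files_py_alt
  rw [show pvPrefixes.length = 4 from rfl, best_char]
  simp only [List.any_map, Function.comp_def]
  split_ifs <;> simp_all [pvPrefixes, List.getD]
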